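-- pv_equiv track=rewrite | github.com/krzychsol/ASD | DynamicProgramming/BajtAlgoZadaniaDynamik/zad8k.py | napraw
-- ===== SOURCE A (Python) =====
-- def napraw ( s, t ):
--     n = len(s)
--     k = len(t)
--
--     F = [[0 for _ in range(n)]for __ in range(k)]
--     if s[0] != t[0]:
--         F[0][0] = 1
--
--     for i in range(1,n):
--         if s[i] != t[0]:
--             F[0][i] = F[0][i-1]+1
--         else:
--             F[0][i] = F[0][i-1]
--
--     for i in range(1,k):
--         if t[i] != s[0]:
--             F[i][0] = F[i-1][0]+1
--         else:
--             F[i][0] = F[i-1][0]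
--
--     for i in range(1,k):
--         for j in range(1,n):
--             if t[i] == s[j]:
--                 F[i][j] = F[i-1][j-1]
--             else:
--                 F[i][j] = min(F[i-1][j-1],F[i-1][j],F[i][j-1])+1
--
--     return F[k-1][n-1]
-- ===== SOURCE B (Python) =====
-- def napraw(s, t):
--     # Demand-driven evaluation: memoized top-down recursion of the DP recurrence,
--     # run with an explicit post-order stack (no table, no recursion limit).
--     n = len(s)
--     k = len(t)
--     memo = {}
--     stack = [(k - 1, n - 1, False)]
--     while stack:
--         i, j, ready = stack.pop()
--         if (i, j) in memo:
--             continue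
--         if not ready:
--             stack.append((i, j, True))
--             if i > 0 and j > 0:
--                 deps = [(i - 1, j - 1), (i - 1, j), (i, j - 1)]
--             elif j > 0:
--                 deps = [(0, j - 1)]
--             elif i > 0:
--                 deps = [(i - 1, 0)]
--             else:
--                 deps = []
--             for d in deps:
--                 if d not in memo:
--                     stack.append((d[0], d[1], False))
--         else:
--             if i == 0 and j == 0:
--                 v = int(s[0] != t[0])
--             elif i == 0:
--                 v = memo[(0, j - 1)] + int(s[j] != t[0])
--             elif j == 0:
--                 v = memo[(i - 1, 0)] + int(t[i] != s[0])
--             elif t[i] == s[j]: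
--                 v = memo[(i - 1, j - 1)]
--             else:
--                 v = min(memo[(i - 1, j - 1)], memo[(i - 1, j)], memo[(i, j - 1)]) + 1
--             memo[(i, j)] = v
--     return memo[(k - 1, n - 1)]
-- ===== Notes on version B (the rewrite author's own statement) =====
-- stated objective: alternative
-- what changed: Replaces A's bottom-up table fill (pre-allocated k x n array written in four separate index-loop phases) by demand-driven top-down evaluation of the same recurrence: a memo dict filled by an explicit post-order work stack starting from the target cell (k-1,n-1), i.e. memoized recursion run iteratively.
import Mathlib
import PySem

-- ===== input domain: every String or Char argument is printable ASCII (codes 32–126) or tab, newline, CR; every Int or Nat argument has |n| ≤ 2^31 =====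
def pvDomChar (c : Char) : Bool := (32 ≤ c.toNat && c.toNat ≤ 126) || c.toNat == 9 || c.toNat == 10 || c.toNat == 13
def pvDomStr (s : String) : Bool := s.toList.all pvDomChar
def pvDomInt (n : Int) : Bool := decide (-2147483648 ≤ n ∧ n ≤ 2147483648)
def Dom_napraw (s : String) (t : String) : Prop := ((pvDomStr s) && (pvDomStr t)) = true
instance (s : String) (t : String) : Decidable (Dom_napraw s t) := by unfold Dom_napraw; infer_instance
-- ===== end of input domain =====

-- B replaces A's bottom-up table fill (a k×n array written in four index-loop phases) by
-- demand-driven top-down evaluation of the recurrence: a memo dict filled by an explicit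
-- post-order work stack starting from the target cell (memoized recursion run iteratively).

-- ===== PORT A =====
-- Python A fills a k×n table F (init + three index loops).  2-D indexing F[i][j] and
-- assignment are ported by pvGet2/pvSet2; under Pre_ (s, t nonempty) every index read
-- or written is in range, so the getD defaults are never consulted.
def pvGet2 (F : List (List Int)) (i j : Nat) : Int := (F.getD i []).getD j 0
def pvSet2 (F : List (List Int)) (i j : Nat) (v : Int) : List (List Int) :=
  F.set i ((F.getD i []).set j v)

def napraw (s : String) (t : String) : Int :=
  let cs := s.toList
  let ct := t.toList
  let n := cs.length
  let k := ct.length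
  let F0 := List.replicate k (List.replicate n (0:Int))
  let F1 := if cs.getD 0 ' ' ≠ ct.getD 0 ' ' then pvSet2 F0 0 0 1 else F0
  let F2 := (List.range' 1 (n-1)).foldl (fun F i =>
      pvSet2 F 0 i (if cs.getD i ' ' ≠ ct.getD 0 ' ' then pvGet2 F 0 (i-1) + 1 else pvGet2 F 0 (i-1))) F1
  let F3 := (List.range' 1 (k-1)).foldl (fun F i =>
      pvSet2 F i 0 (if ct.getD i ' ' ≠ cs.getD 0 ' ' then pvGet2 F (i-1) 0 + 1 else pvGet2 F (i-1) 0)) F2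
  let F4 := (List.range' 1 (k-1)).foldl (fun F i =>
      (List.range' 1 (n-1)).foldl (fun F j =>
        pvSet2 F i j (if ct.getD i ' ' = cs.getD j ' ' then pvGet2 F (i-1) (j-1)
          else min (min (pvGet2 F (i-1) (j-1)) (pvGet2 F (i-1) j)) (pvGet2 F i (j-1)) + 1)) F) F3
  pvGet2 F4 (k-1) (n-1)

-- ===== PORT B =====
-- Source B's dependency lists: children pushed for cell (i, j) (same branch order as Source B).
-- Cell indices are Nat: under Pre_ (s, t nonempty) they match Python's nonnegative ints
-- exactly; on empty input Python raises (excluded by Pre_), Nat subtraction clamps.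
def pvDeps (i j : Nat) : List (Nat × Nat) :=
  if 0 < i ∧ 0 < j then [(i-1, j-1), (i-1, j), (i, j-1)]
  else if 0 < j then [(0, j-1)]
  else if 0 < i then [(i-1, 0)]
  else []

-- Source B's `else:` branch computing v; Python's memo[...] is ported as getD _ 0 — under
-- the stack invariant every dep is present, so the default is never consulted.
def pvVal (cs ct : List Char) (memo : PySem.Dict (Nat × Nat) Int) (i j : Nat) : Int :=
  if i = 0 ∧ j = 0 then (if cs.getD 0 ' ' ≠ ct.getD 0 ' ' then 1 else 0)
  else if i = 0 then memo.getD (0, j-1) 0 + (if cs.getD j ' ' ≠ ct.getD 0 ' ' then 1 else 0)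
  else if j = 0 then memo.getD (i-1, 0) 0 + (if ct.getD i ' ' ≠ cs.getD 0 ' ' then 1 else 0)
  else if ct.getD i ' ' = cs.getD j ' ' then memo.getD (i-1, j-1) 0
  else min (min (memo.getD (i-1, j-1) 0) (memo.getD (i-1, j) 0)) (memo.getD (i, j-1) 0) + 1

-- termination potential for the work stack (proof-only; Source B needs none)
def pvPhi (f : Nat × Nat × Bool) : Nat := if f.2.2 then 1 else 4 ^ (f.1 + f.2.1 + 1)
def pvMu (st : List (Nat × Nat × Bool)) : Nat := (st.map pvPhi).sum

theorem pvMu_cons (f : Nat × Nat × Bool) (l : List (Nat × Nat × Bool)) :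
    pvMu (f :: l) = pvPhi f + pvMu l := by simp [pvMu]

theorem pvMu_append (l₁ l₂ : List (Nat × Nat × Bool)) :
    pvMu (l₁ ++ l₂) = pvMu l₁ + pvMu l₂ := by simp [pvMu]

theorem pvMu_reverse (l : List (Nat × Nat × Bool)) : pvMu l.reverse = pvMu l := by
  simp [pvMu, List.map_reverse]

theorem pvPhi_pos (f : Nat × Nat × Bool) : 0 < pvPhi f := by
  unfold pvPhi; split
  · omega
  · exact Nat.pow_pos (by omega)

theorem pvMu_filter_le (p : Nat × Nat → Bool) (l : List (Nat × Nat)) :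
    pvMu ((l.filter p).map (fun d => (d.1, d.2, false)))
      ≤ pvMu (l.map (fun d => (d.1, d.2, false))) := by
  induction l with
  | nil => simp [pvMu]
  | cons x l ih =>
    simp only [List.filter_cons]
    split
    · simpa [pvMu_cons] using Nat.add_le_add_left ih (pvPhi (x.1, x.2, false))
    · simp only [List.map_cons, pvMu_cons]
      omega

theorem pvMu_expand_lt (i j : Nat) (p : Nat × Nat → Bool) (rest : List (Nat × Nat × Bool)) :
    pvMu ((((pvDeps i j).filter p).map (fun d => (d.1, d.2, false))).reverse
          ++ (i, j, true) :: rest)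
      < pvMu ((i, j, false) :: rest) := by
  rw [pvMu_append, pvMu_reverse, pvMu_cons, pvMu_cons]
  have hfil := pvMu_filter_le p (pvDeps i j)
  have hphi : pvPhi (i, j, true) = 1 := rfl
  have hbig : pvPhi (i, j, false) = 4 ^ (i + j + 1) := rfl
  have hdeps : pvMu ((pvDeps i j).map (fun d => (d.1, d.2, false))) + 1 < 4 ^ (i + j + 1) := by
    unfold pvDeps
    split
    · rename_i h
      have h1 : 4 ^ (i - 1 + (j - 1) + 1) ≤ 4 ^ (i + j) :=
        Nat.pow_le_pow_right (by omega) (by omega)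
      have h2 : 4 ^ (i - 1 + j + 1) ≤ 4 ^ (i + j) :=
        Nat.pow_le_pow_right (by omega) (by omega)
      have h3 : 4 ^ (i + (j - 1) + 1) ≤ 4 ^ (i + j) :=
        Nat.pow_le_pow_right (by omega) (by omega)
      have h4 : 4 ^ 2 ≤ 4 ^ (i + j) := Nat.pow_le_pow_right (by omega) (by omega)
      have h5 : 4 ^ (i + j + 1) = 4 * 4 ^ (i + j) := by
        rw [Nat.pow_succ]; ring
      simp only [pvMu, pvPhi, List.map_cons, List.map_nil, List.sum_cons, List.sum_nil]
      simp only [Bool.false_eq_true, if_false]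
      omega
    · split
      · rename_i h1 h2
        have hji : i = 0 := by omega
        subst hji
        have h3 : 4 ^ (0 + (j - 1) + 1) ≤ 4 ^ (0 + j) :=
          Nat.pow_le_pow_right (by omega) (by omega)
        have h5 : 4 ^ (0 + j + 1) = 4 * 4 ^ (0 + j) := by
          rw [Nat.pow_succ]; ring
        have h6 : 1 ≤ 4 ^ (0 + j) := Nat.one_le_pow _ _ (by omega)
        simp only [pvMu, pvPhi, List.map_cons, List.map_nil, List.sum_cons, List.sum_nil]
        simp only [Bool.false_eq_true, if_false]
        omega
      · split
        · rename_i h1 h2 h3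
          have hj : j = 0 := by omega
          subst hj
          have h4 : 4 ^ (i - 1 + 0 + 1) ≤ 4 ^ (i + 0) :=
            Nat.pow_le_pow_right (by omega) (by omega)
          have h5 : 4 ^ (i + 0 + 1) = 4 * 4 ^ (i + 0) := by
            rw [Nat.pow_succ]; ring
          have h6 : 1 ≤ 4 ^ (i + 0) := Nat.one_le_pow _ _ (by omega)
          simp only [pvMu, pvPhi, List.map_cons, List.map_nil, List.sum_cons, List.sum_nil]
          simp only [Bool.false_eq_true, if_false]
          omega
        · simp only [List.map_nil, pvMu, List.sum_nil]
          have : 1 ≤ 4 ^ (i + j) := Nat.one_le_pow _ _ (by omega)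
          have h5 : 4 ^ (i + j + 1) = 4 * 4 ^ (i + j) := by
            rw [Nat.pow_succ]; ring
          omega
  omega

-- Source B's while loop: pop the top frame; skip if memoized; expand an unready frame
-- (re-push it ready, then its unmemoized children, last child on top); compute a ready one.
def pvLoop (cs ct : List Char) (memo : PySem.Dict (Nat × Nat) Int)
    (st : List (Nat × Nat × Bool)) : PySem.Dict (Nat × Nat) Int :=
  match st with
  | [] => memo
  | (i, j, ready) :: rest =>
    if (memo.get? (i, j)).isSome then pvLoop cs ct memo rest
    else if ready then pvLoop cs ct (memo.insert (i, j) (pvVal cs ct memo i j)) rest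
    else
      pvLoop cs ct memo
        ((((pvDeps i j).filter (fun d => (memo.get? d).isNone)).map
            (fun d => (d.1, d.2, false))).reverse ++ (i, j, true) :: rest)
termination_by pvMu st
decreasing_by
  · have := pvPhi_pos (i, j, ready); rw [pvMu_cons]; omega
  · have := pvPhi_pos (i, j, ready); rw [pvMu_cons]; omega
  · rename_i hready
    have hr : ready = false := by
      cases ready
      · rfl
      · simp at hready
    subst hr
    exact pvMu_expand_lt i j _ rest

def napraw_alt (s : String) (t : String) : Int :=
  let cs := s.toList
  let ct := t.toList
  let memo := pvLoop cs ct PySem.Dict.empty [(ct.length - 1, cs.length - 1, false)]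
  memo.getD (ct.length - 1, cs.length - 1) 0

-- ===== PRECONDITION & SPEC =====
-- Python A evaluates s[0] and t[0]: it raises IndexError iff s or t is empty
-- (Source B raises KeyError there too), so exactly those inputs are excluded.
def Pre_napraw (s : String) (t : String) : Prop := s ≠ "" ∧ t ≠ ""
instance (s : String) (t : String) : Decidable (Pre_napraw s t) := by unfold Pre_napraw; infer_instance
def pvWitness_napraw : String × String := ("ab", "b")

def Spec_napraw (s : String) (t : String) (out : Int) : Prop := out = napraw_alt s t
instance (s : String) (t : String) (out : Int) : Decidable (Spec_napraw s t out) := by unfold Spec_napraw; infer_instance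

-- ===== CLAIM (what is proved, stated in full; the proofs are below) =====
def Claim_equal_napraw : Prop := ∀ (s : String) (t : String), Dom_napraw s t → Pre_napraw s t → Spec_napraw s t (napraw s t)

-- ===== LEMMAS AND PROOFS =====

-- the DP recurrence both ports compute
def pvG (cs ct : List Char) (i j : Nat) : Int :=
  match i, j with
  | 0, 0 => if cs.getD 0 ' ' ≠ ct.getD 0 ' ' then 1 else 0
  | 0, j+1 => if cs.getD (j+1) ' ' ≠ ct.getD 0 ' ' then pvG cs ct 0 j + 1 else pvG cs ct 0 j
  | i+1, 0 => if ct.getD (i+1) ' ' ≠ cs.getD 0 ' ' then pvG cs ct i 0 + 1 else pvG cs ct i 0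
  | i+1, j+1 => if ct.getD (i+1) ' ' = cs.getD (j+1) ' ' then pvG cs ct i j
      else min (min (pvG cs ct i j) (pvG cs ct i (j+1))) (pvG cs ct (i+1) j) + 1
termination_by (i, j)

theorem pv_getD_set_self {α : Type} (l : List α) (d : α) (i : Nat) (v : α) (h : i < l.length) :
    (l.set i v).getD i d = v := by
  simp [List.getD_eq_getElem?_getD, List.getElem?_set_self h]

theorem pv_getD_set_ne {α : Type} (l : List α) (d : α) {i j : Nat} (v : α) (h : i ≠ j) :
    (l.set i v).getD j d = l.getD j d := by
  simp [List.getD_eq_getElem?_getD, List.getElem?_set_ne h]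

theorem pvGet2_set2_self (F : List (List Int)) (i j : Nat) (v : Int)
    (hi : i < F.length) (hj : j < (F.getD i []).length) :
    pvGet2 (pvSet2 F i j v) i j = v := by
  unfold pvGet2 pvSet2
  rw [pv_getD_set_self _ _ _ _ hi, pv_getD_set_self _ _ _ _ hj]

theorem pvGet2_set2_ne (F : List (List Int)) (i j : Nat) (v : Int) (i' j' : Nat)
    (h : i ≠ i' ∨ j ≠ j') :
    pvGet2 (pvSet2 F i j v) i' j' = pvGet2 F i' j' := by
  unfold pvGet2 pvSet2
  by_cases hii : i = i'
  · subst hii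
    rcases h with h | h
    · exact absurd rfl h
    · by_cases hlen : i < F.length
      · rw [pv_getD_set_self _ _ _ _ hlen, pv_getD_set_ne _ _ _ h]
      · rw [List.set_eq_of_length_le (Nat.le_of_not_lt hlen)]
  · rw [pv_getD_set_ne _ _ _ hii]

theorem pvSet2_length (F : List (List Int)) (i j : Nat) (v : Int) :
    (pvSet2 F i j v).length = F.length := by simp [pvSet2]

theorem pvSet2_row_length (F : List (List Int)) (i j : Nat) (v : Int) (i' : Nat) :
    ((pvSet2 F i j v).getD i' []).length = (F.getD i' []).length := by
  unfold pvSet2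
  by_cases hii : i = i'
  · subst hii
    by_cases hlen : i < F.length
    · rw [pv_getD_set_self _ _ _ _ hlen]; simp
    · rw [List.set_eq_of_length_le (Nat.le_of_not_lt hlen)]
  · rw [pv_getD_set_ne _ _ _ hii]


-- loop states of port A, named for the invariant proofs
def pvA1 (cs ct : List Char) : List (List Int) :=
  let F0 := List.replicate ct.length (List.replicate cs.length (0:Int))
  if cs.getD 0 ' ' ≠ ct.getD 0 ' ' then pvSet2 F0 0 0 1 else F0

def pvA2 (cs ct : List Char) (m : Nat) : List (List Int) :=
  (List.range' 1 m).foldl (fun F i =>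
      pvSet2 F 0 i (if cs.getD i ' ' ≠ ct.getD 0 ' ' then pvGet2 F 0 (i-1) + 1 else pvGet2 F 0 (i-1))) (pvA1 cs ct)

def pvA3 (cs ct : List Char) (m : Nat) : List (List Int) :=
  (List.range' 1 m).foldl (fun F i =>
      pvSet2 F i 0 (if ct.getD i ' ' ≠ cs.getD 0 ' ' then pvGet2 F (i-1) 0 + 1 else pvGet2 F (i-1) 0)) (pvA2 cs ct (cs.length - 1))

def pvInner (cs ct : List Char) (i : Nat) (F : List (List Int)) (m : Nat) : List (List Int) :=
  (List.range' 1 m).foldl (fun F j =>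
        pvSet2 F i j (if ct.getD i ' ' = cs.getD j ' ' then pvGet2 F (i-1) (j-1)
          else min (min (pvGet2 F (i-1) (j-1)) (pvGet2 F (i-1) j)) (pvGet2 F i (j-1)) + 1)) F

def pvA4 (cs ct : List Char) (m : Nat) : List (List Int) :=
  (List.range' 1 m).foldl (fun F i => pvInner cs ct i F (cs.length - 1)) (pvA3 cs ct (ct.length - 1))

theorem napraw_eq_pvA4 (s t : String) :
    napraw s t = pvGet2 (pvA4 s.toList t.toList (t.toList.length - 1)) (t.toList.length - 1) (s.toList.length - 1) := rfl

def pvLens (cs ct : List Char) (F : List (List Int)) : Prop :=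
  F.length = ct.length ∧ ∀ i' < ct.length, (F.getD i' []).length = cs.length

theorem pvLens_set2 (cs ct : List Char) (F : List (List Int)) (i j : Nat) (v : Int)
    (h : pvLens cs ct F) : pvLens cs ct (pvSet2 F i j v) :=
  ⟨by rw [pvSet2_length]; exact h.1, fun i' hi' => by rw [pvSet2_row_length]; exact h.2 i' hi'⟩

theorem pvGet2_replicate (k n : Nat) (i j : Nat) :
    pvGet2 (List.replicate k (List.replicate n (0:Int))) i j = 0 := by
  unfold pvGet2
  simp [List.getD_eq_getElem?_getD, List.getElem?_replicate]
  split_ifs <;> simp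

theorem foldl_range'_succ {α : Type} (f : α → Nat → α) (x : α) (m : Nat) :
    (List.range' 1 (m+1)).foldl f x = f ((List.range' 1 m).foldl f x) (m+1) := by
  rw [show List.range' 1 (m+1) = List.range' 1 m ++ [1+m] by
        simpa using List.range'_concat (s:=1) (n:=m) (step:=1),
      List.foldl_append]
  simp [Nat.add_comm]

theorem pvA1_lens (cs ct : List Char) : pvLens cs ct (pvA1 cs ct) := by
  have hbase : pvLens cs ct (List.replicate ct.length (List.replicate cs.length (0:Int))) :=
    ⟨by simp, fun i' h => by simp [List.getD_eq_getElem?_getD, h]⟩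
  unfold pvA1
  split
  · exact pvLens_set2 _ _ _ _ _ _ hbase
  · exact hbase

theorem pvA1_zero (cs ct : List Char) (i' j : Nat) (h : 1 ≤ i') :
    pvGet2 (pvA1 cs ct) i' j = 0 := by
  unfold pvA1
  split
  · rw [pvGet2_set2_ne _ _ _ _ _ _ (Or.inl (by omega))]
    exact pvGet2_replicate _ _ _ _
  · exact pvGet2_replicate _ _ _ _

theorem pvA1_00 (cs ct : List Char) (hn : cs ≠ []) (hk : ct ≠ []) :
    pvGet2 (pvA1 cs ct) 0 0 = pvG cs ct 0 0 := by
  have hk' : 0 < ct.length := List.length_pos_iff.mpr hk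
  have hn' : 0 < cs.length := List.length_pos_iff.mpr hn
  have hrow : ((List.replicate ct.length (List.replicate cs.length (0:Int))).getD 0 []).length = cs.length := by
    simp [List.getD_eq_getElem?_getD, hk']
  rw [pvG]
  unfold pvA1
  split
  · rw [pvGet2_set2_self _ _ _ _ (by simpa using hk') (by rw [hrow]; exact hn')]
  · rw [pvGet2_replicate]

theorem pvA2_spec (cs ct : List Char) (hn : cs ≠ []) (hk : ct ≠ []) (m : Nat)
    (hm : m ≤ cs.length - 1) :
    pvLens cs ct (pvA2 cs ct m) ∧
    (∀ j ≤ m, pvGet2 (pvA2 cs ct m) 0 j = pvG cs ct 0 j) ∧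
    (∀ i' j, 1 ≤ i' → pvGet2 (pvA2 cs ct m) i' j = 0) := by
  have hk' : 0 < ct.length := List.length_pos_iff.mpr hk
  have hn' : 0 < cs.length := List.length_pos_iff.mpr hn
  induction m with
  | zero =>
    refine ⟨by simpa [pvA2] using pvA1_lens cs ct, ?_, ?_⟩
    · intro j hj
      interval_cases j
      simpa [pvA2] using pvA1_00 cs ct hn hk
    · intro i' j h
      simpa [pvA2] using pvA1_zero cs ct i' j h
  | succ m ih =>
    have ih := ih (by omega)
    have hstep : pvA2 cs ct (m+1) = pvSet2 (pvA2 cs ct m) 0 (m+1)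
        (if cs.getD (m+1) ' ' ≠ ct.getD 0 ' ' then pvGet2 (pvA2 cs ct m) 0 ((m+1)-1) + 1
         else pvGet2 (pvA2 cs ct m) 0 ((m+1)-1)) := by
      unfold pvA2
      rw [foldl_range'_succ]
    have hval : (if cs.getD (m+1) ' ' ≠ ct.getD 0 ' ' then pvGet2 (pvA2 cs ct m) 0 ((m+1)-1) + 1
         else pvGet2 (pvA2 cs ct m) 0 ((m+1)-1)) = pvG cs ct 0 (m+1) := by
      have h1 : (m+1)-1 = m := by omega
      rw [h1, ih.2.1 m (le_refl m), pvG]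
    refine ⟨?_, ?_, ?_⟩
    · rw [hstep]; exact pvLens_set2 _ _ _ _ _ _ ih.1
    · intro j hj
      rw [hstep]
      rcases Nat.lt_or_ge j (m+1) with hlt | hge
      · rw [pvGet2_set2_ne _ _ _ _ _ _ (Or.inr (by omega))]
        exact ih.2.1 j (by omega)
      · have hj' : j = m+1 := by omega
        subst hj'
        rw [pvGet2_set2_self _ _ _ _ (by rw [ih.1.1]; exact hk')
              (by rw [ih.1.2 0 hk']; omega), hval]
    · intro i' j h
      rw [hstep, pvGet2_set2_ne _ _ _ _ _ _ (Or.inl (by omega))]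
      exact ih.2.2 i' j h

theorem pvA3_spec (cs ct : List Char) (hn : cs ≠ []) (hk : ct ≠ []) (m : Nat)
    (hm : m ≤ ct.length - 1) :
    pvLens cs ct (pvA3 cs ct m) ∧
    (∀ j < cs.length, pvGet2 (pvA3 cs ct m) 0 j = pvG cs ct 0 j) ∧
    (∀ i' ≤ m, pvGet2 (pvA3 cs ct m) i' 0 = pvG cs ct i' 0) ∧
    (∀ i' j, 1 ≤ i' → 1 ≤ j → pvGet2 (pvA3 cs ct m) i' j = 0) := by
  have hk' : 0 < ct.length := List.length_pos_iff.mpr hk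
  have hn' : 0 < cs.length := List.length_pos_iff.mpr hn
  have hA2 := pvA2_spec cs ct hn hk (cs.length - 1) (le_refl _)
  induction m with
  | zero =>
    refine ⟨by simpa [pvA3] using hA2.1, ?_, ?_, ?_⟩
    · intro j hj
      simpa [pvA3] using hA2.2.1 j (by omega)
    · intro i' hi'
      interval_cases i'
      simpa [pvA3] using hA2.2.1 0 (by omega)
    · intro i' j h1 h2
      simpa [pvA3] using hA2.2.2 i' j h1
  | succ m ih =>
    have ih := ih (by omega)
    have hstep : pvA3 cs ct (m+1) = pvSet2 (pvA3 cs ct m) (m+1) 0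
        (if ct.getD (m+1) ' ' ≠ cs.getD 0 ' ' then pvGet2 (pvA3 cs ct m) ((m+1)-1) 0 + 1
         else pvGet2 (pvA3 cs ct m) ((m+1)-1) 0) := by
      unfold pvA3
      rw [foldl_range'_succ]
    have hval : (if ct.getD (m+1) ' ' ≠ cs.getD 0 ' ' then pvGet2 (pvA3 cs ct m) ((m+1)-1) 0 + 1
         else pvGet2 (pvA3 cs ct m) ((m+1)-1) 0) = pvG cs ct (m+1) 0 := by
      have h1 : (m+1)-1 = m := by omega
      rw [h1, ih.2.2.1 m (le_refl m), pvG]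
    refine ⟨?_, ?_, ?_, ?_⟩
    · rw [hstep]; exact pvLens_set2 _ _ _ _ _ _ ih.1
    · intro j hj
      rw [hstep, pvGet2_set2_ne _ _ _ _ _ _ (Or.inl (by omega))]
      exact ih.2.1 j hj
    · intro i' hi'
      rw [hstep]
      rcases Nat.lt_or_ge i' (m+1) with hlt | hge
      · rw [pvGet2_set2_ne _ _ _ _ _ _ (Or.inl (by omega))]
        exact ih.2.2.1 i' (by omega)
      · have hi'' : i' = m+1 := by omega
        subst hi''
        rw [pvGet2_set2_self _ _ _ _ (by rw [ih.1.1]; omega)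
              (by rw [ih.1.2 (m+1) (by omega)]; exact hn'), hval]
    · intro i' j h1 h2
      rw [hstep, pvGet2_set2_ne _ _ _ _ _ _ (Or.inr (by omega))]
      exact ih.2.2.2 i' j h1 h2

theorem pvInner_spec (cs ct : List Char) (i : Nat) (F : List (List Int))
    (hn : cs ≠ []) (hi1 : 1 ≤ i) (hik : i < ct.length)
    (hlens : pvLens cs ct F)
    (hprev : ∀ j < cs.length, pvGet2 F (i-1) j = pvG cs ct (i-1) j)
    (hcol : pvGet2 F i 0 = pvG cs ct i 0)
    (m : Nat) (hm : m ≤ cs.length - 1) :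
    pvLens cs ct (pvInner cs ct i F m) ∧
    (∀ i' j, i' ≠ i → pvGet2 (pvInner cs ct i F m) i' j = pvGet2 F i' j) ∧
    (∀ j ≤ m, pvGet2 (pvInner cs ct i F m) i j = pvG cs ct i j) := by
  have hn' : 0 < cs.length := List.length_pos_iff.mpr hn
  induction m with
  | zero =>
    exact ⟨by simpa [pvInner] using hlens,
           fun i' j _ => by simp [pvInner],
           fun j hj => by interval_cases j; simpa [pvInner] using hcol⟩
  | succ m ih =>
    have ih := ih (by omega)
    have hstep : pvInner cs ct i F (m+1) = pvSet2 (pvInner cs ct i F m) i (m+1)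
        (if ct.getD i ' ' = cs.getD (m+1) ' ' then pvGet2 (pvInner cs ct i F m) (i-1) ((m+1)-1)
          else min (min (pvGet2 (pvInner cs ct i F m) (i-1) ((m+1)-1))
                       (pvGet2 (pvInner cs ct i F m) (i-1) (m+1)))
                   (pvGet2 (pvInner cs ct i F m) i ((m+1)-1)) + 1) := by
      unfold pvInner
      rw [foldl_range'_succ]
    obtain ⟨i0, rfl⟩ : ∃ i0, i = i0 + 1 := ⟨i - 1, by omega⟩
    have hne : i0 + 1 - 1 ≠ i0 + 1 := by omega
    have hval : (if ct.getD (i0+1) ' ' = cs.getD (m+1) ' '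
          then pvGet2 (pvInner cs ct (i0+1) F m) (i0+1-1) ((m+1)-1)
          else min (min (pvGet2 (pvInner cs ct (i0+1) F m) (i0+1-1) ((m+1)-1))
                       (pvGet2 (pvInner cs ct (i0+1) F m) (i0+1-1) (m+1)))
                   (pvGet2 (pvInner cs ct (i0+1) F m) (i0+1) ((m+1)-1)) + 1)
        = pvG cs ct (i0+1) (m+1) := by
      have h1 : (m+1)-1 = m := by omega
      have h2 : i0+1-1 = i0 := by omega
      rw [h1, h2,
          ih.2.1 i0 m (by omega), ih.2.1 i0 (m+1) (by omega)]
      rw [show pvGet2 F i0 m = pvG cs ct i0 m by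
            have := hprev m (by omega); rwa [h2] at this,
          show pvGet2 F i0 (m+1) = pvG cs ct i0 (m+1) by
            have := hprev (m+1) (by omega); rwa [h2] at this,
          ih.2.2 m (le_refl m)]
      conv_rhs => rw [pvG]
    refine ⟨?_, ?_, ?_⟩
    · rw [hstep]; exact pvLens_set2 _ _ _ _ _ _ ih.1
    · intro i' j hne'
      rw [hstep, pvGet2_set2_ne _ _ _ _ _ _ (Or.inl (by omega))]
      exact ih.2.1 i' j hne'
    · intro j hj
      rw [hstep]
      rcases Nat.lt_or_ge j (m+1) with hlt | hge
      · rw [pvGet2_set2_ne _ _ _ _ _ _ (Or.inr (by omega))]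
        exact ih.2.2 j (by omega)
      · have hj' : j = m+1 := by omega
        subst hj'
        rw [pvGet2_set2_self _ _ _ _ (by rw [ih.1.1]; omega)
              (by rw [ih.1.2 (i0+1) (by omega)]; omega), hval]

theorem pvA4_spec (cs ct : List Char) (hn : cs ≠ []) (hk : ct ≠ []) (m : Nat)
    (hm : m ≤ ct.length - 1) :
    pvLens cs ct (pvA4 cs ct m) ∧
    (∀ i' ≤ m, ∀ j < cs.length, pvGet2 (pvA4 cs ct m) i' j = pvG cs ct i' j) ∧
    (∀ i', m+1 ≤ i' → i' < ct.length → pvGet2 (pvA4 cs ct m) i' 0 = pvG cs ct i' 0) := by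
  have hk' : 0 < ct.length := List.length_pos_iff.mpr hk
  have hn' : 0 < cs.length := List.length_pos_iff.mpr hn
  have hA3 := pvA3_spec cs ct hn hk (ct.length - 1) (le_refl _)
  induction m with
  | zero =>
    refine ⟨by simpa [pvA4] using hA3.1, ?_, ?_⟩
    · intro i' hi' j hj
      interval_cases i'
      simpa [pvA4] using hA3.2.1 j hj
    · intro i' h1 h2
      simpa [pvA4] using hA3.2.2.1 i' (by omega)
  | succ m ih =>
    have ih := ih (by omega)
    have hstep : pvA4 cs ct (m+1) = pvInner cs ct (m+1) (pvA4 cs ct m) (cs.length - 1) := by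
      unfold pvA4
      rw [foldl_range'_succ]
    have hinner := pvInner_spec cs ct (m+1) (pvA4 cs ct m) hn (by omega) (by omega) ih.1
      (by intro j hj
          have h1 : (m+1)-1 = m := by omega
          rw [h1]
          exact ih.2.1 m (le_refl m) j hj)
      (ih.2.2 (m+1) (le_refl _) (by omega))
      (cs.length - 1) (le_refl _)
    refine ⟨?_, ?_, ?_⟩
    · rw [hstep]; exact hinner.1
    · intro i' hi' j hj
      rw [hstep]
      rcases Nat.lt_or_ge i' (m+1) with hlt | hge
      · rw [hinner.2.1 i' j (by omega)]
        exact ih.2.1 i' (by omega) j hj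
      · have hi'' : i' = m+1 := by omega
        subst hi''
        exact hinner.2.2 j (by omega)
    · intro i' h1 h2
      rw [hstep, hinner.2.1 i' 0 (by omega)]
      exact ih.2.2 i' (by omega) h2

theorem napraw_eq_pvG (s t : String) (hn : s.toList ≠ []) (hk : t.toList ≠ []) :
    napraw s t = pvG s.toList t.toList (t.toList.length - 1) (s.toList.length - 1) := by
  have hn' : 0 < s.toList.length := List.length_pos_iff.mpr hn
  rw [napraw_eq_pvA4]
  exact (pvA4_spec s.toList t.toList hn hk (t.toList.length - 1) (le_refl _)).2.1
    (t.toList.length - 1) (le_refl _) (s.toList.length - 1) (by omega)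

-- ===== B side: the stack machine fills memo with pvG values =====

def pvMemoOK (cs ct : List Char) (memo : PySem.Dict (Nat × Nat) Int) : Prop :=
  ∀ d v, memo.get? d = some v → v = pvG cs ct d.1 d.2

-- every ready frame's deps are memoized or scheduled above it (seen = keys above)
def pvStackOK (memo : PySem.Dict (Nat × Nat) Int) (seen : List (Nat × Nat)) :
    List (Nat × Nat × Bool) → Prop
  | [] => True
  | (i, j, ready) :: rest =>
      (ready = true → ∀ d ∈ pvDeps i j, (memo.get? d).isSome ∨ d ∈ seen) ∧
      pvStackOK memo ((i, j) :: seen) rest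

theorem pvStackOK_mono (memo memo' : PySem.Dict (Nat × Nat) Int)
    (hm : ∀ d, (memo.get? d).isSome → (memo'.get? d).isSome) :
    ∀ (st : List (Nat × Nat × Bool)) (seen seen' : List (Nat × Nat)),
    (∀ d, d ∈ seen → (memo'.get? d).isSome ∨ d ∈ seen') →
    pvStackOK memo seen st → pvStackOK memo' seen' st := by
  intro st
  induction st with
  | nil => intro seen seen' _ _; trivial
  | cons f rest ih =>
    obtain ⟨i, j, ready⟩ := f
    intro seen seen' hs h
    refine ⟨?_, ?_⟩
    · intro hr d hd
      rcases h.1 hr d hd with h1 | h1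
      · exact Or.inl (hm d h1)
      · exact hs d h1
    · refine ih ((i, j) :: seen) ((i, j) :: seen') ?_ h.2
      intro d hd
      rcases List.mem_cons.mp hd with h1 | h1
      · exact Or.inr (by simp [h1])
      · rcases hs d h1 with h2 | h2
        · exact Or.inl h2
        · exact Or.inr (List.mem_cons_of_mem _ h2)

theorem pvStackOK_append_false (memo : PySem.Dict (Nat × Nat) Int)
    (l : List (Nat × Nat × Bool)) (hl : ∀ f ∈ l, f.2.2 = false) :
    ∀ (seen : List (Nat × Nat)) (st : List (Nat × Nat × Bool)),
    pvStackOK memo (l.map (fun f => (f.1, f.2.1)) ++ seen) st →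
    pvStackOK memo seen (l ++ st) := by
  induction l with
  | nil => intro seen st h; simpa using h
  | cons f l ih =>
    obtain ⟨i, j, r⟩ := f
    have hr : r = false := hl (i, j, r) (List.mem_cons_self)
    subst hr
    intro seen st h
    refine ⟨fun hc => by simp at hc, ?_⟩
    refine ih (fun g hg => hl g (List.mem_cons_of_mem _ hg)) ((i, j) :: seen) st ?_
    refine pvStackOK_mono memo memo (fun d hd => hd) st _ _ ?_ h
    intro d hd
    simp only [List.map_cons, List.cons_append, List.mem_cons, List.mem_append,
      List.mem_map] at hd ⊢
    rcases hd with h1 | h1 | h1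
    · exact Or.inr (Or.inr (Or.inl h1))
    · exact Or.inr (Or.inl h1)
    · exact Or.inr (Or.inr (Or.inr h1))

theorem pv_get?_insert_isSome (memo : PySem.Dict (Nat × Nat) Int)
    (k : Nat × Nat) (v : Int) (d : Nat × Nat) (h : (memo.get? d).isSome) :
    ((memo.insert k v).get? d).isSome := by
  rw [PySem.Dict.get?_insert]
  split
  · rfl
  · exact h

theorem pvVal_eq_pvG (cs ct : List Char) (memo : PySem.Dict (Nat × Nat) Int) (i j : Nat)
    (h : ∀ d ∈ pvDeps i j, memo.getD d 0 = pvG cs ct d.1 d.2) :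
    pvVal cs ct memo i j = pvG cs ct i j := by
  cases i with
  | zero =>
    cases j with
    | zero => rw [pvG]; simp [pvVal]
    | succ j' =>
      have hd := h (0, j') (by simp [pvDeps])
      rw [pvG]
      simp only [pvVal, Nat.add_sub_cancel, Nat.succ_ne_zero, and_false, if_false] at *
      rw [hd]
      split_ifs <;> simp
  | succ i' =>
    cases j with
    | zero =>
      have hd := h (i', 0) (by simp [pvDeps])
      rw [pvG]
      simp only [pvVal, Nat.add_sub_cancel, Nat.succ_ne_zero, false_and, if_false] at *
      rw [hd]
      split_ifs <;> simp
    | succ j' =>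
      have h1 := h (i', j') (by simp [pvDeps])
      have h2 := h (i', j' + 1) (by simp [pvDeps])
      have h3 := h (i' + 1, j') (by simp [pvDeps])
      rw [pvG]
      simp only [pvVal, Nat.add_sub_cancel, Nat.succ_ne_zero, false_and, if_false] at *
      rw [h1, h2, h3]

theorem pvLoop_spec (cs ct : List Char) (memo : PySem.Dict (Nat × Nat) Int)
    (st : List (Nat × Nat × Bool)) :
    pvMemoOK cs ct memo → pvStackOK memo [] st →
    pvMemoOK cs ct (pvLoop cs ct memo st) ∧
    (∀ d, (memo.get? d).isSome → ((pvLoop cs ct memo st).get? d).isSome) ∧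
    (∀ f ∈ st, ((pvLoop cs ct memo st).get? (f.1, f.2.1)).isSome) := by
  induction memo, st using pvLoop.induct cs ct with
  | case1 memo =>
    intro hM _
    simp only [pvLoop]
    exact ⟨hM, fun d h => h, fun f hf => by simp at hf⟩
  | case2 memo i j ready rest h ih =>
    intro hM hS
    obtain ⟨hS1, hS2⟩ := hS
    have hS' : pvStackOK memo [] rest := by
      refine pvStackOK_mono memo memo (fun d hd => hd) rest _ [] ?_ hS2
      intro d hd
      simp only [List.mem_cons, List.not_mem_nil, or_false] at hd
      subst hd
      exact Or.inl h
    have ih' := ih hM hS'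
    simp only [pvLoop, h, if_true]
    refine ⟨ih'.1, ih'.2.1, ?_⟩
    intro f hf
    rcases List.mem_cons.mp hf with hf | hf
    · subst hf; exact ih'.2.1 (i, j) h
    · exact ih'.2.2 f hf
  | case3 memo i j rest h ih =>
    intro hM hS
    obtain ⟨hS1, hS2⟩ := hS
    have hdeps : ∀ d ∈ pvDeps i j, (memo.get? d).isSome := by
      intro d hd
      rcases hS1 rfl d hd with h1 | h1
      · exact h1
      · simp at h1
    have hv : pvVal cs ct memo i j = pvG cs ct i j := by
      refine pvVal_eq_pvG cs ct memo i j ?_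
      intro d hd
      obtain ⟨v, hvd⟩ := Option.isSome_iff_exists.mp (hdeps d hd)
      rw [PySem.Dict.getD_eq_get?_getD, hvd]
      exact hM d v hvd
    have hM' : pvMemoOK cs ct (memo.insert (i, j) (pvVal cs ct memo i j)) := by
      intro d v hget
      rw [PySem.Dict.get?_insert] at hget
      split at hget
      · rename_i hdij
        subst hdij
        cases hget
        exact hv
      · exact hM d v hget
    have hmono : ∀ d, (memo.get? d).isSome →
        (((memo.insert (i, j) (pvVal cs ct memo i j))).get? d).isSome :=
      fun d hd => pv_get?_insert_isSome memo _ _ d hd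
    have hS' : pvStackOK (memo.insert (i, j) (pvVal cs ct memo i j)) [] rest := by
      refine pvStackOK_mono memo _ hmono rest _ [] ?_ hS2
      intro d hd
      simp only [List.mem_cons, List.not_mem_nil, or_false] at hd
      subst hd
      exact Or.inl (by rw [PySem.Dict.get?_insert_self]; rfl)
    have ih' := ih hM' hS'
    simp only [pvLoop]
    rw [if_neg h]
    simp only [if_true]
    refine ⟨ih'.1, fun d hd => ih'.2.1 d (hmono d hd), ?_⟩
    intro f hf
    rcases List.mem_cons.mp hf with hf | hf
    · subst hf
      exact ih'.2.1 (i, j) (by rw [PySem.Dict.get?_insert_self]; rfl)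
    · exact ih'.2.2 f hf
  | case4 memo i j ready rest h hready ih =>
    intro hM hS
    have hr : ready = false := by
      cases ready
      · rfl
      · simp at hready
    subst hr
    obtain ⟨hS1, hS2⟩ := hS
    have hkeys : ∀ g ∈ ((pvDeps i j).filter (fun d => (memo.get? d).isNone)).map
        (fun d => (d.1, d.2, false)), g.2.2 = false := by
      intro g hg
      simp only [List.mem_map] at hg
      obtain ⟨d, _, rfl⟩ := hg
      rfl
    have hS' : pvStackOK memo []
        ((((pvDeps i j).filter (fun d => (memo.get? d).isNone)).map
            (fun d => (d.1, d.2, false))).reverse ++ (i, j, true) :: rest) := by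
      refine pvStackOK_append_false memo _ (fun g hg => hkeys g (List.mem_reverse.mp hg)) [] _ ?_
      refine ⟨?_, ?_⟩
      · intro _ d hd
        by_cases hdm : (memo.get? d).isSome
        · exact Or.inl hdm
        · refine Or.inr ?_
          simp only [List.map_reverse, List.map_map, List.mem_append, List.mem_reverse,
            List.mem_map, List.mem_filter]
          exact Or.inl ⟨d, ⟨hd, by simp [Option.isNone_iff_eq_none]; exact
            Option.not_isSome_iff_eq_none.mp hdm⟩, rfl⟩
      · refine pvStackOK_mono memo memo (fun d hd => hd) rest _ _ ?_ hS2
        intro d hd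
        simp only [List.mem_cons, List.not_mem_nil, or_false] at hd
        exact Or.inr (by simp [hd])
    have ih' := ih hM hS'
    simp only [pvLoop]
    rw [if_neg h]
    simp only [Bool.false_eq_true, if_false]
    refine ⟨ih'.1, ih'.2.1, ?_⟩
    intro f hf
    rcases List.mem_cons.mp hf with hf | hf
    · subst hf
      exact ih'.2.2 (i, j, true) (by simp)
    · exact ih'.2.2 f (by simp [hf])

theorem napraw_alt_eq_pvG (s t : String) :
    napraw_alt s t = pvG s.toList t.toList (t.toList.length - 1) (s.toList.length - 1) := by
  have hM : pvMemoOK s.toList t.toList PySem.Dict.empty := by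
    intro d v hvd
    rw [PySem.Dict.get?_empty] at hvd
    cases hvd
  have hS : pvStackOK PySem.Dict.empty []
      [(t.toList.length - 1, s.toList.length - 1, false)] := by
    simp [pvStackOK]
  have h := pvLoop_spec s.toList t.toList PySem.Dict.empty _ hM hS
  have hsome := h.2.2 (t.toList.length - 1, s.toList.length - 1, false) (by simp)
  simp only at hsome
  obtain ⟨v, hv⟩ := Option.isSome_iff_exists.mp hsome
  show (pvLoop s.toList t.toList PySem.Dict.empty
      [(t.toList.length - 1, s.toList.length - 1, false)]).getD
      (t.toList.length - 1, s.toList.length - 1) 0 = _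
  rw [PySem.Dict.getD_eq_get?_getD, hv]
  simpa using h.1 _ v hv

-- ===== VERDICT (by name: the statement is the Claim_ definition above) =====
theorem napraw_spec : Claim_equal_napraw := by
  intro s t _ hpre
  unfold Spec_napraw
  have hn : s.toList ≠ [] := fun h => hpre.1 (by simpa using h)
  have hk : t.toList ≠ [] := fun h => hpre.2 (by simpa using h)
  rw [napraw_eq_pvG s t hn hk, napraw_alt_eq_pvG s t]
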